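-- pv_equiv track=rewrite | github.com/chao-ji/tf-xlnet | create_tfrecord_squad.py | _get_doc_spans
-- ===== SOURCE A (Python) =====
-- def _get_doc_spans(target_len, actual_len, stride=128):
--   """Compute the start offset(s) and length(s) for the current paragraph.
--
--   Note that if the paragraph is longer than the limit `target_len`, we will
--   end up with multiple **spans** with increasing start offsets that cover the
--   whole paragraph.
--
--   Args:
--     target_len: int scalar, num of tokens allocated for the paragraph.
--     actual_len: int scalar, the actual num of tokens in the paragraph.
--     stride: (Optional) int scalar, the distances between the start offsets if
--       there are multiple spans. Defaults to 128.
--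
--   Returns:
--     doc_spans: list of 2-tuples, storing the start offset and lengths for the
--       spans.
--   """
--   doc_spans = []
--   start_offset = 0
--   while start_offset < actual_len:
--     curr_span_len = actual_len - start_offset
--     if curr_span_len > target_len:
--       curr_span_len = target_len
--     doc_spans.append((start_offset, curr_span_len))
--     if start_offset + curr_span_len == actual_len:
--       break
--     # the increment cannot exceed `curr_span_len` to make sure that there is no
--     # gap between neighboring spans
--     start_offset += min(curr_span_len, stride)
--   return doc_spans
-- ===== SOURCE B (Python) =====
-- def _get_doc_spans(target_len, actual_len, stride=128):
--   """Closed-form version: span starts are i*step by arithmetic, no accumulation loop."""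
--   if actual_len <= 0:
--     return []
--   if actual_len <= target_len:
--     return [(0, actual_len)]
--   step = min(target_len, stride)
--   k = -((-(actual_len - target_len)) // step)  # ceil((actual_len-target_len)/step)
--   return [(i * step, min(actual_len - i * step, target_len)) for i in range(k + 1)]
-- ===== Notes on version B (the rewrite author's own statement) =====
-- stated objective: alternative
-- what changed: Replaces the incremental while-loop accumulation (with early break) by a closed-form span count via ceiling division and a single comprehension computing each start offset arithmetically as i*step; Pre_ excludes only the degenerate inputs on which A loops forever (actual_len>max(0,target_len) with step=min(target_len,stride)<=0).
import Mathlib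
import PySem

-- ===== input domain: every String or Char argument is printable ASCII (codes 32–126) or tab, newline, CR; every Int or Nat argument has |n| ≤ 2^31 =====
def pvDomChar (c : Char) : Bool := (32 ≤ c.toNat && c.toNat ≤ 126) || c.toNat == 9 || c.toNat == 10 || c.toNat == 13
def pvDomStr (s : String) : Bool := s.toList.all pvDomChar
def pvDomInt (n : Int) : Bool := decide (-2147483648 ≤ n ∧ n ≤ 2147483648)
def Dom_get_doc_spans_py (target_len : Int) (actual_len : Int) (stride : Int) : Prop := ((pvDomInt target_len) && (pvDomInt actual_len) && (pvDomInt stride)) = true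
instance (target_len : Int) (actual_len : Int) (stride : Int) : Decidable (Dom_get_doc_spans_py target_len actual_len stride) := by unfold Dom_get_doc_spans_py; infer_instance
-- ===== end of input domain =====

-- B builds the same spans by closed-form arithmetic instead of A's incremental while-loop; return values agree on Pre_.

-- ===== PORT A =====
-- the while-loop of A, transcribed with a fuel guard (fuel only makes the loop total:
-- inside Pre_ the loop runs at most actual_len iterations, so the fuel is never exhausted)
def pvLoopA (target_len actual_len stride : Int) : Nat → Int → List (Int × Int) → List (Int × Int)
  | 0, _, acc => acc.reverse
  | fuel + 1, start_offset, acc =>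
    if start_offset < actual_len then
      let curr0 := actual_len - start_offset
      let curr_span_len := if curr0 > target_len then target_len else curr0
      let acc' := (start_offset, curr_span_len) :: acc
      if start_offset + curr_span_len = actual_len then acc'.reverse
      else pvLoopA target_len actual_len stride fuel (start_offset + min curr_span_len stride) acc'
    else acc.reverse

def get_doc_spans_py (target_len : Int) (actual_len : Int) (stride : Int) : List (Int × Int) :=
  pvLoopA target_len actual_len stride (actual_len.toNat + 1) 0 []

-- ===== PORT B =====
def get_doc_spans_py_alt (target_len : Int) (actual_len : Int) (stride : Int) : List (Int × Int) :=
  if actual_len ≤ 0 then []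
  else if actual_len ≤ target_len then [(0, actual_len)]
  else
    let step := min target_len stride
    let k := -(PySem.Int.floordiv (-(actual_len - target_len)) step)
    (PySem.List.pyRange 0 (k + 1) 1).map (fun i => (i * step, min (actual_len - i * step) target_len))

-- ===== PRECONDITION & SPEC =====
-- Pre_ excludes exactly the inputs on which A never returns (infinite loop): those with
-- actual_len > max(0, target_len) and min(target_len, stride) ≤ 0; on them B raises (step = 0) or returns garbage.
def Pre_get_doc_spans_py (target_len : Int) (actual_len : Int) (stride : Int) : Prop :=
  actual_len ≤ 0 ∨ actual_len ≤ target_len ∨ (0 < target_len ∧ 0 < stride)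
instance (target_len : Int) (actual_len : Int) (stride : Int) : Decidable (Pre_get_doc_spans_py target_len actual_len stride) := by unfold Pre_get_doc_spans_py; infer_instance
def pvWitness_get_doc_spans_py : Int × Int × Int := (3, 10, 2)

def Spec_get_doc_spans_py (target_len : Int) (actual_len : Int) (stride : Int) (out : List (Int × Int)) : Prop := out = get_doc_spans_py_alt target_len actual_len stride
instance (target_len : Int) (actual_len : Int) (stride : Int) (out : List (Int × Int)) : Decidable (Spec_get_doc_spans_py target_len actual_len stride out) := by unfold Spec_get_doc_spans_py; infer_instance

-- ===== CLAIM (what is proved, stated in full; the proofs are below) =====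
def Claim_equal_get_doc_spans_py : Prop := ∀ (target_len : Int) (actual_len : Int) (stride : Int), Dom_get_doc_spans_py target_len actual_len stride → Pre_get_doc_spans_py target_len actual_len stride → Spec_get_doc_spans_py target_len actual_len stride (get_doc_spans_py target_len actual_len stride)

-- ===== LEMMAS AND PROOFS =====

-- The main loop invariant: starting the loop at offset j*step with the first j spans
-- accumulated (reversed) yields exactly B's arithmetic tail, provided enough fuel.
lemma pvLoopA_spans (t a s step k : Int) (hstep : 0 < step) (hstep_eq : step = min t s)
    (hstept : step ≤ t)
    (hk1 : a - t ≤ k * step) (hk2 : k * step < a - t + step) :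
    ∀ (m : Nat) (j : Int), 0 ≤ j → j + m = k → ∀ (fuel : Nat), m < fuel → ∀ (acc : List (Int × Int)),
      pvLoopA t a s fuel (j * step) acc =
        acc.reverse ++ (PySem.List.pyRange j (k + 1) 1).map (fun i => (i * step, min (a - i * step) t)) := by
  intro m
  induction m with
  | zero =>
    intro j hj hjk fuel hfuel acc
    obtain ⟨f, rfl⟩ : ∃ f, fuel = f + 1 := ⟨fuel - 1, by omega⟩
    have hjk' : j = k := by omega
    subst hjk'
    have hlt : j * step < a := by nlinarith
    have hle : a - j * step ≤ t := by linarith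
    have hcond : ¬ (a - j * step > t) := by omega
    simp only [pvLoopA, hlt, if_pos, hcond, if_false]
    have hbrk : j * step + (a - j * step) = a := by ring
    rw [PySem.List.pyRange_one_cons (by omega), PySem.List.pyRange_one_eq_nil (by omega)]
    simp [hbrk, min_eq_left hle]
  | succ m ih =>
    intro j hj hjk fuel hfuel acc
    obtain ⟨f, rfl⟩ : ∃ f, fuel = f + 1 := ⟨fuel - 1, by omega⟩
    have hjlt : j < k := by omega
    have hbig : t < a - j * step := by nlinarith
    have hlt : j * step < a := by linarith
    have hcond : a - j * step > t := hbig
    simp only [pvLoopA, hlt, if_pos, hcond]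
    have hnobrk : ¬ (j * step + t = a) := by omega
    rw [if_neg hnobrk]
    have hmin : min t s = step := hstep_eq.symm
    have hnext : j * step + min t s = (j + 1) * step := by rw [hmin]; ring
    rw [hnext, ih (j + 1) (by omega) (by omega) f (by omega)]
    rw [PySem.List.pyRange_one_cons (a := j) (b := k + 1) (by omega)]
    simp [min_eq_right (le_of_lt hbig)]

-- ===== VERDICT (by name: the statement is the Claim_ definition above) =====
theorem get_doc_spans_py_spec : Claim_equal_get_doc_spans_py := by
  intro t a s _ hpre
  unfold Spec_get_doc_spans_py get_doc_spans_py get_doc_spans_py_alt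
  by_cases ha0 : a ≤ 0
  · -- loop guard fails immediately
    have : ¬ ((0 : Int) < a) := by omega
    simp [pvLoopA, this, ha0]
  · by_cases hat : a ≤ t
    · -- single span, breaks on first iteration
      have h0a : (0 : Int) < a := by omega
      simp [pvLoopA, h0a, ha0, hat]
    · -- multi-span case: t > 0, s > 0
      have hts : 0 < t ∧ 0 < s := by
        rcases hpre with h | h | h
        · omega
        · omega
        · exact h
      have ht : 0 < t := hts.1
      have hs : 0 < s := hts.2
      have hta : t < a := by omega
      set step := min t s with hstep_eq
      have hstep : 0 < step := lt_min ht hs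
      have hstept : step ≤ t := min_le_left t s
      set k := -(PySem.Int.floordiv (-(a - t)) step) with hk_def
      -- ceiling-division bracket for k
      have hk : (k - 1) * step < a - t ∧ a - t ≤ k * step := by
        have := (PySem.Int.neg_floordiv_neg_eq_iff_of_pos (a := a - t) (b := step) (q := k) hstep).mp rfl
        exact this
      have hk1 : a - t ≤ k * step := hk.2
      have hk2 : k * step < a - t + step := by nlinarith [hk.1]
      have hk0 : 0 ≤ k := by nlinarith
      have hka : k < a := by nlinarith
      have hfuel : k.toNat < a.toNat + 1 := by omega
      have := pvLoopA_spans t a s step k hstep rfl hstept hk1 hk2 k.toNat 0 le_rfl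
        (by omega) (a.toNat + 1) hfuel []
      simp only [zero_mul] at this
      simp only [ha0, hat, if_false]
      rw [this]
      simp only [List.reverse_nil, List.nil_append, hk_def]
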